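-- pv_equiv track=rewrite | github.com/likthvishal/Slot-Tagging-and-Relation-Extraction | slot_tagging/MFT.py | baseline_trainer
-- ===== SOURCE A (Python) =====
-- from collections import Counter,defaultdict
--
-- def baseline_trainer(sentences):
--     pair_counts=Counter([pair for sent in sentences for pair in sent])
--     word_val=defaultdict(int)
--     word_tag={}
--     top_tag=defaultdict(int)
--     for pair,val in pair_counts.items():
--         word,tag=pair[0],pair[1]
--         top_tag[tag]+=val
--         if(word_val[word]<val):
--             word_val[word]=val
--             word_tag[word]=tag
--     top_tag=dict(top_tag)
--     return word_tag,max(top_tag,key=top_tag.get)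
-- ===== SOURCE B (Python) =====
-- from collections import Counter, defaultdict
--
-- def baseline_trainer(sentences):
--     total = Counter()
--     by_word = defaultdict(Counter)
--     for sent in sentences:
--         for word, tag in sent:
--             total[tag] += 1
--             by_word[word][tag] += 1
--     word_tag = {w: max(c, key=c.get) for w, c in by_word.items()}
--     return word_tag, max(total, key=total.get)
-- ===== Notes on version B (the rewrite author's own statement) =====
-- stated objective: simpler
-- what changed: Replaces the pair-Counter plus running strict-max/accumulator loop by a single pass building a global tag Counter and a nested per-word Counter, then a group-then-argmax comprehension (max(c, key=c.get)) per word and for the overall tag.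
import Mathlib
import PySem

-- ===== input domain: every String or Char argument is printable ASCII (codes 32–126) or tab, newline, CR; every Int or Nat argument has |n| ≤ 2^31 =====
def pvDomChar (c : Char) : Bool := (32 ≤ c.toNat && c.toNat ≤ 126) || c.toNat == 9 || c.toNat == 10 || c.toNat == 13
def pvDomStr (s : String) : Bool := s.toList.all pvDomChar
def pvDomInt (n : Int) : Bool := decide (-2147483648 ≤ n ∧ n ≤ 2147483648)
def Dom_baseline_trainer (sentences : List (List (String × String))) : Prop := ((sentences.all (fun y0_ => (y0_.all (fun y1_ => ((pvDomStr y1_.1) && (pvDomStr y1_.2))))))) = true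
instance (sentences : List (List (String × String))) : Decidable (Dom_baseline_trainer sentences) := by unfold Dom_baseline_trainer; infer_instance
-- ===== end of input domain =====

-- B replaces A's pair-Counter + running strict-max loop by a one-pass nested Counter and per-word argmax (same cost, simpler decomposition).


-- ===== PORT A =====
-- pair_counts = Counter(flattened pairs); then one loop over pair_counts.items() updating
-- top_tag (defaultdict(int)), and (word_val, word_tag) under the strict `word_val[word] < val` test.
-- (Python's `word_val[word]` read inserts a 0 into the defaultdict; word_val is only ever read
-- via that default lookup afterwards, so getD is exact.)  max(top_tag, key=top_tag.get) is
-- max? over the keys with the stored value; it raises on an empty dict — excluded by Pre_.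
def baseline_trainer (sentences : List (List (String × String))) : (List (String × String)) × String :=
  let pair_counts : PySem.Dict (String × String) Int :=
    PySem.Dict.counter (sentences.flatMap (fun sent => sent))
  let st :=
    pair_counts.items.foldl
      (fun (st : (PySem.Dict String Int × PySem.Dict String String) × PySem.Dict String Int) pv =>
        (if st.1.1.getD pv.1.1 0 < pv.2 then
            (st.1.1.insert pv.1.1 pv.2, st.1.2.insert pv.1.1 pv.1.2)
          else st.1,
         st.2.modify pv.1.2 0 (· + pv.2)))
      ((PySem.Dict.empty, PySem.Dict.empty), PySem.Dict.empty)
  let word_tag := st.1.2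
  let top_tag := st.2
  (word_tag.items, (PySem.List.max? top_tag.keys (fun t => top_tag.getD t 0)).getD "")

-- ===== PORT B =====
-- one pass over the sentences building total : Counter[tag] and by_word : word -> Counter[tag],
-- then word_tag = {w: max(c, key=c.get)} and max(total, key=total.get).
def baseline_trainer_alt (sentences : List (List (String × String))) : (List (String × String)) × String :=
  let st :=
    sentences.foldl
      (fun st sent =>
        sent.foldl
          (fun (st : PySem.Dict String Int × PySem.Dict String (PySem.Dict String Int)) p =>
            (st.1.modify p.2 0 (· + 1),
             st.2.modify p.1 PySem.Dict.empty (fun c => c.modify p.2 0 (· + 1))))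
          st)
      (PySem.Dict.empty, PySem.Dict.empty)
  let total := st.1
  let by_word := st.2
  let word_tag : PySem.Dict String String :=
    PySem.Dict.ofList (by_word.items.map (fun wc =>
      (wc.1, (PySem.List.max? wc.2.keys (fun t => wc.2.getD t 0)).getD "")))
  (word_tag.items, (PySem.List.max? total.keys (fun t => total.getD t 0)).getD "")

-- ===== PRECONDITION & SPEC =====
-- Pre_ excludes exactly the inputs with no (word, tag) pair at all: there Python's
-- max() over the empty tag dict raises ValueError (in A and in B alike).
def Pre_baseline_trainer (sentences : List (List (String × String))) : Prop :=
  sentences.flatMap (fun sent => sent) ≠ []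
instance (sentences : List (List (String × String))) : Decidable (Pre_baseline_trainer sentences) := by unfold Pre_baseline_trainer; infer_instance

def pvWitness_baseline_trainer : (List (List (String × String))) := [[("a", "X")]]

def Spec_baseline_trainer (sentences : List (List (String × String))) (out : (List (String × String)) × String) : Prop := out = baseline_trainer_alt sentences
instance (sentences : List (List (String × String))) (out : (List (String × String)) × String) : Decidable (Spec_baseline_trainer sentences out) := by unfold Spec_baseline_trainer; infer_instance

-- ===== CLAIM (what is proved, stated in full; the proofs are below) =====
def Claim_equal_baseline_trainer : Prop := ∀ (sentences : List (List (String × String))), Dom_baseline_trainer sentences → Pre_baseline_trainer sentences → Spec_baseline_trainer sentences (baseline_trainer sentences)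


-- ===== LEMMAS AND PROOFS =====

-- `max?` over a list with one element appended: one more step of the running-max loop.
lemma pvMax?_append_one {α κ : Type} [LT κ] [DecidableLT κ] (l : List α) (x : α) (key : α → κ) :
    PySem.List.max? (l ++ [x]) key
      = match PySem.List.max? l key with
        | none => some x
        | some m => if key m < key x then some x else some m := by
  simp only [PySem.List.max?, List.foldl_append, List.foldl_cons, List.foldl_nil]
  rfl

lemma pvMax?_map {α β κ : Type} [LT κ] [DecidableLT κ] (l : List α) (f : α → β) (key : β → κ) :
    PySem.List.max? (l.map f) key = (PySem.List.max? l (fun a => key (f a))).map f := by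
  induction l using List.reverseRecOn with
  | nil => rfl
  | append_singleton l x ih =>
      rw [List.map_append, List.map_singleton, pvMax?_append_one, pvMax?_append_one, ih]
      cases PySem.List.max? l (fun a => key (f a)) with
      | none => rfl
      | some m => by_cases h : key (f m) < key (f x) <;> simp [h]

lemma pvMax?_congr {α κ : Type} [LT κ] [DecidableLT κ] (l : List α) (k1 k2 : α → κ)
    (h : ∀ x ∈ l, k1 x = k2 x) : PySem.List.max? l k1 = PySem.List.max? l k2 := by
  induction l using List.reverseRecOn with
  | nil => rfl
  | append_singleton l x ih =>
      rw [pvMax?_append_one, pvMax?_append_one, ih (fun y hy => h y (by simp [hy]))]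
      cases hm' : PySem.List.max? l k2 with
      | none => rfl
      | some m =>
          have hm : m ∈ l := PySem.List.max?_mem hm'
          simp only [h m (by simp [hm]), h x (by simp)]

lemma pvSet_contains_iff {α : Type} [BEq α] [LawfulBEq α] (s : PySem.Set α) (x : α) :
    s.contains x = true ↔ x ∈ s := by
  simp [PySem.Set.contains]

lemma pvSet_add_of_mem {α : Type} [BEq α] [LawfulBEq α] (s : PySem.Set α) (x : α) (h : x ∈ s) :
    s.add x = s := by
  have hc : s.contains x = true := (pvSet_contains_iff s x).2 h
  unfold PySem.Set.add
  rw [if_pos hc]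

lemma pvSet_add_of_not_mem {α : Type} [BEq α] [LawfulBEq α] (s : PySem.Set α) (x : α) (h : x ∉ s) :
    s.add x = s ++ [x] := by
  unfold PySem.Set.add
  rw [if_neg (fun hct => h ((pvSet_contains_iff s x).1 hct))]

lemma pvSet_ofList_append_one {α : Type} [BEq α] (l : List α) (x : α) :
    PySem.Set.ofList (l ++ [x]) = (PySem.Set.ofList l).add x := by
  rw [PySem.Set.ofList_eq_foldl, PySem.Set.ofList_eq_foldl, List.foldl_append]
  rfl

-- first-occurrence dedup commutes with mapping over an already deduplicated list
lemma pvSet_ofList_map_ofList {α β : Type} [BEq α] [LawfulBEq α] [BEq β] [LawfulBEq β]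
    (l : List α) (f : α → β) :
    PySem.Set.ofList ((PySem.Set.ofList l).map f) = PySem.Set.ofList (l.map f) := by
  induction l using List.reverseRecOn with
  | nil => rfl
  | append_singleton l x ih =>
      rw [pvSet_ofList_append_one, List.map_append, List.map_singleton,
        pvSet_ofList_append_one]
      by_cases hx : x ∈ PySem.Set.ofList l
      · rw [pvSet_add_of_mem _ _ hx, ih, pvSet_add_of_mem]
        rw [PySem.Set.mem_ofList]
        exact List.mem_map_of_mem ((PySem.Set.mem_ofList l x).1 hx)
      · rw [pvSet_add_of_not_mem _ _ hx, List.map_append, List.map_singleton,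
          pvSet_ofList_append_one, ih]

-- first-occurrence dedup commutes with filtering
lemma pvSet_ofList_filter {α : Type} [BEq α] [LawfulBEq α] (l : List α) (p : α → Bool) :
    (PySem.Set.ofList l).filter p = PySem.Set.ofList (l.filter p) := by
  induction l using List.reverseRecOn with
  | nil => rfl
  | append_singleton l x ih =>
      rw [pvSet_ofList_append_one, List.filter_append]
      cases hp : p x
      · by_cases hx : x ∈ PySem.Set.ofList l
        · rw [pvSet_add_of_mem _ _ hx, ih]
          simp [hp]
        · rw [pvSet_add_of_not_mem _ _ hx, List.filter_append, ih]
          simp [hp]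
      · have hfx : List.filter p [x] = [x] := by simp [hp]
        rw [hfx, pvSet_ofList_append_one]
        by_cases hx : x ∈ PySem.Set.ofList l
        · rw [pvSet_add_of_mem _ _ hx, ih, pvSet_add_of_mem]
          rw [PySem.Set.mem_ofList]
          exact List.mem_filter.2 ⟨(PySem.Set.mem_ofList l x).1 hx, hp⟩
        · rw [pvSet_add_of_not_mem _ _ hx, List.filter_append, hfx, ih]
          rw [pvSet_add_of_not_mem]
          intro hmem
          exact hx ((PySem.Set.mem_ofList l x).2 (List.mem_of_mem_filter
            ((PySem.Set.mem_ofList (l.filter p) x).1 hmem)))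

-- over a list of pairs whose first component is constant, dedup commutes with `.map (·.2)`
lemma pvSet_ofList_map_snd {α β : Type} [BEq α] [LawfulBEq α] [BEq β] [LawfulBEq β]
    (w : α) (l : List (α × β)) (hl : ∀ x ∈ l, x.1 = w) :
    PySem.Set.ofList (l.map (fun x => x.2)) = (PySem.Set.ofList l).map (fun x => x.2) := by
  induction l using List.reverseRecOn with
  | nil => rfl
  | append_singleton l x ih =>
      have hl' : ∀ y ∈ l, y.1 = w := fun y hy => hl y (by simp [hy])
      have hxw : x.1 = w := hl x (by simp)
      rw [List.map_append, List.map_singleton, pvSet_ofList_append_one,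
        pvSet_ofList_append_one, ih hl']
      by_cases hx : x ∈ PySem.Set.ofList l
      · rw [pvSet_add_of_mem _ _ hx, pvSet_add_of_mem]
        exact List.mem_map_of_mem hx
      · rw [pvSet_add_of_not_mem _ _ hx, pvSet_add_of_not_mem, List.map_append,
          List.map_singleton]
        intro hmem
        rcases List.mem_map.1 hmem with ⟨y, hy, hsnd⟩
        have hyw : y.1 = w := hl' y ((PySem.Set.mem_ofList l y).1 hy)
        have : y = x := by
          cases x; cases y
          simp_all
        exact hx (this ▸ hy)

lemma pvCount_map_snd {α β : Type} [BEq α] [LawfulBEq α] [BEq β] [LawfulBEq β]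
    (w : α) (l : List (α × β)) (hl : ∀ x ∈ l, x.1 = w) (t : β) :
    (l.map (fun x => x.2)).count t = l.count (w, t) := by
  induction l with
  | nil => rfl
  | cons y ys ih =>
      have hyw : y.1 = w := hl y (by simp)
      have ih' := ih (fun z hz => hl z (by simp [hz]))
      rcases y with ⟨y1, y2⟩
      simp only at hyw
      by_cases h : y2 = t
      · subst h
        rw [hyw]
        simp [List.count_cons, ih']
      · have hne : (y1, y2) ≠ (w, t) := by simp [h]
        simp [List.count_cons, h, hne, ih']

lemma pvSet_update_nil {α : Type} [BEq α] (xs : List α) :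
    PySem.Set.update ([] : PySem.Set α) xs = PySem.Set.ofList xs := by
  rw [PySem.Set.ofList_eq_foldl]; rfl

-- accumulate-by-key loop: the value at t sums the contributions of entries keyed t
lemma pvGetD_foldl_modify_addc {α κ : Type} [BEq κ] [LawfulBEq κ] [DecidableEq κ]
    (l : List α) (key : α → κ) (c : α → Int) (d : PySem.Dict κ Int) (t : κ) :
    (l.foldl (fun d q => d.modify (key q) 0 (· + c q)) d).getD t 0
      = d.getD t 0 + ((l.filter (fun q => key q == t)).map c).sum := by
  induction l generalizing d with
  | nil => simp
  | cons q qs ih =>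
      rw [List.foldl_cons, ih]
      by_cases h : key q = t
      · simp [List.filter_cons, h, PySem.Dict.getD_modify]
        ring
      · have h' : ¬ (t = key q) := fun hh => h hh.symm
        simp [List.filter_cons, h, h', PySem.Dict.getD_modify]

lemma pvSum_indicator_nodup {α : Type} [DecidableEq α] (l : List α) (x : α) (h : l.Nodup) :
    (l.map (fun q => if q = x then (1 : Int) else 0)).sum = if x ∈ l then (1 : Int) else 0 := by
  induction l with
  | nil => simp
  | cons y ys ih =>
      have hys := h.of_cons
      have hnot : y ∉ ys := (List.nodup_cons.1 h).1
      rw [List.map_cons, List.sum_cons, ih hys]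
      by_cases hyx : y = x
      · subst hyx
        simp [hnot]
      · simp [hyx, Ne.symm hyx]

lemma pvSum_indicator {α : Type} [BEq α] [LawfulBEq α] [DecidableEq α] (D : List α) (p : α → Bool) (x : α)
    (hD : D.Nodup) :
    ((D.filter p).map (fun q => if q = x then (1 : Int) else 0)).sum
      = if x ∈ D ∧ p x then (1 : Int) else 0 := by
  rw [pvSum_indicator_nodup (D.filter p) x (hD.filter p)]
  simp [List.mem_filter]

-- grouping distinct elements and summing their multiplicities counts the mapped list
lemma pvSum_counts {α κ : Type} [BEq α] [LawfulBEq α] [DecidableEq α] [BEq κ] [LawfulBEq κ]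
    (l : List α) (key : α → κ) (t : κ) (D : List α) (hD : D.Nodup)
    (hsub : ∀ x ∈ l, x ∈ D) :
    ((D.filter (fun q => key q == t)).map (fun q => (l.count q : Int))).sum
      = ((l.map key).count t : Int) := by
  induction l with
  | nil => simp
  | cons x xs ih =>
      have hsub' : ∀ y ∈ xs, y ∈ D := fun y hy => hsub y (by simp [hy])
      have hxD : x ∈ D := hsub x (by simp)
      have hsplit : ∀ q : α, ((x :: xs).count q : Int)
          = (xs.count q : Int) + (if q = x then (1 : Int) else 0) := by
        intro q
        by_cases h : q = x
        · simp [List.count_cons, h]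
        · have h2 : ¬ x = q := fun hh => h hh.symm
          simp [List.count_cons, h, h2]
      calc ((D.filter (fun q => key q == t)).map (fun q => ((x :: xs).count q : Int))).sum
          = ((D.filter (fun q => key q == t)).map
              (fun q => (xs.count q : Int) + (if q = x then (1 : Int) else 0))).sum := by
            exact congrArg List.sum (List.map_congr_left (fun q _ => hsplit q))
        _ = ((D.filter (fun q => key q == t)).map (fun q => (xs.count q : Int))).sum
            + ((D.filter (fun q => key q == t)).map
                (fun q => if q = x then (1 : Int) else 0)).sum := by
            rw [← List.sum_map_add]
        _ = ((xs.map key).count t : Int) + (if x ∈ D ∧ key x == t then (1 : Int) else 0) := by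
            rw [ih hsub', pvSum_indicator D _ x hD]
        _ = (((x :: xs).map key).count t : Int) := by
            by_cases h : key x = t <;>
              (first
                | (simp [List.count_cons, h, hxD]; done)
                | (simp [List.count_cons, h, hxD]; rfl)
                | rfl)

-- the per-word tag counters B maintains, characterised
lemma pvByWord_getD (l : List (String × String))
    (d : PySem.Dict String (PySem.Dict String Int)) (w : String) :
    (l.foldl (fun d p => d.modify p.1 PySem.Dict.empty
        (fun c => c.modify p.2 0 (· + 1))) d).getD w PySem.Dict.empty
      = ((l.filter (fun p => p.1 == w)).map (fun p => p.2)).foldl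
          (fun c t => c.modify t 0 (· + 1)) (d.getD w PySem.Dict.empty) := by
  induction l generalizing d with
  | nil => simp
  | cons p ps ih =>
      rw [List.foldl_cons, ih]
      by_cases h : p.1 = w
      · simp [List.filter_cons, h, PySem.Dict.getD_modify]
      · have h2 : ¬ w = p.1 := fun hh => h hh.symm
        simp [List.filter_cons, h, h2, PySem.Dict.getD_modify]

-- A's top_tag accumulation over the pair Counter IS the tag Counter
lemma pvTopTag (pairs : List (String × String)) :
    (PySem.Dict.counter pairs).items.foldl
        (fun d pv => d.modify pv.1.2 0 (· + pv.2)) PySem.Dict.empty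
      = PySem.Dict.counter (pairs.map (fun p => p.2)) := by
  rw [PySem.Dict.items_counter, List.foldl_map]
  have hkeys : (List.foldl
      (fun d q => d.modify q.2 0 (· + (pairs.count q : Int)))
      PySem.Dict.empty (PySem.Set.ofList pairs)).keys
      = PySem.Set.ofList (pairs.map (fun p => p.2)) := by
    rw [PySem.Dict.keys_foldl_modify_key (PySem.Set.ofList pairs) (fun q => q.2) 0
      (fun _ q _ => _ + (pairs.count q : Int)) PySem.Dict.empty]
    rw [PySem.Dict.keys_empty, pvSet_update_nil, pvSet_ofList_map_ofList]
  have hget : ∀ t, (List.foldl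
      (fun d q => d.modify q.2 0 (· + (pairs.count q : Int)))
      PySem.Dict.empty (PySem.Set.ofList pairs)).getD t 0
      = ((pairs.map (fun p => p.2)).count t : Int) := by
    intro t
    rw [pvGetD_foldl_modify_addc (PySem.Set.ofList pairs) (fun q => q.2)
      (fun q => (pairs.count q : Int)) PySem.Dict.empty t]
    rw [PySem.Dict.getD_empty, zero_add]
    exact pvSum_counts pairs (fun q => q.2) t (PySem.Set.ofList pairs)
      (PySem.Set.nodup_ofList pairs)
      (fun x hx => (PySem.Set.mem_ofList pairs x).2 hx)
  apply PySem.Dict.ext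
  rw [PySem.Dict.items_eq_map_keys _ (by rw [hkeys]; exact PySem.Set.nodup_ofList _) 0,
    PySem.Dict.items_eq_map_keys _
      (by rw [PySem.Dict.keys_counter]; exact PySem.Set.nodup_ofList _) 0,
    hkeys, PySem.Dict.keys_counter]
  refine List.map_congr_left (fun k _ => ?_)
  rw [hget k, PySem.Dict.getD_counter]

def pvWStep (st : PySem.Dict String Int × PySem.Dict String String)
    (pv : (String × String) × Int) :
    PySem.Dict String Int × PySem.Dict String String :=
  if st.1.getD pv.1.1 0 < pv.2 then (st.1.insert pv.1.1 pv.2, st.2.insert pv.1.1 pv.1.2)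
  else st

def pvBest (L : List ((String × String) × Int)) (w : String) :
    Option ((String × String) × Int) :=
  PySem.List.max? (L.filter (fun x => x.1.1 == w)) (fun x => x.2)

lemma pvBest_none (L : List ((String × String) × Int)) (w : String)
    (hw : w ∉ L.map (fun x => x.1.1)) : pvBest L w = none := by
  unfold pvBest
  have : L.filter (fun x => x.1.1 == w) = [] := by
    rw [List.filter_eq_nil_iff]
    intro x hx
    simp only [beq_iff_eq]
    exact fun hxe => hw (List.mem_map.2 ⟨x, hx, hxe⟩)
  rw [this]
  rfl

lemma pvBest_some (L : List ((String × String) × Int)) (w : String)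
    (hw : w ∈ L.map (fun x => x.1.1)) : ∃ m, pvBest L w = some m := by
  cases hb : pvBest L w with
  | some m => exact ⟨m, rfl⟩
  | none =>
      rcases List.mem_map.1 hw with ⟨x, hx, hxe⟩
      have hmem : x ∈ L.filter (fun y => y.1.1 == w) :=
        List.mem_filter.2 ⟨hx, by simp [hxe]⟩
      rw [pvBest, PySem.List.max?_eq_none_iff] at hb
      rw [hb] at hmem
      exact absurd hmem (List.not_mem_nil)

-- A's strict-< running-max loop, characterised: per word it keeps the first maximum
lemma pvWLoop (L : List ((String × String) × Int)) (hL : ∀ x ∈ L, 1 ≤ x.2) :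
    (L.foldl pvWStep (PySem.Dict.empty, PySem.Dict.empty)).2.items
      = (PySem.Set.ofList (L.map (fun x => x.1.1))).map
          (fun w => (w, ((pvBest L w).map (fun x => x.1.2)).getD ""))
    ∧ ∀ w, (L.foldl pvWStep (PySem.Dict.empty, PySem.Dict.empty)).1.getD w 0
      = ((pvBest L w).map (fun x => x.2)).getD 0 := by
  induction L using List.reverseRecOn with
  | nil =>
      constructor
      · rfl
      · intro w
        rfl
  | append_singleton L x ih =>
      have hL' : ∀ y ∈ L, 1 ≤ y.2 := fun y hy => hL y (by simp [hy])
      have hx1 : 1 ≤ x.2 := hL x (by simp)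
      obtain ⟨ihI, ihV⟩ := ih hL'
      rw [List.foldl_append, List.foldl_cons, List.foldl_nil]
      set r := L.foldl pvWStep (PySem.Dict.empty, PySem.Dict.empty) with hrdef
      have hbest : ∀ w', pvBest (L ++ [x]) w' =
          if x.1.1 = w' then
            (match pvBest L w' with
             | none => some x
             | some m => if m.2 < x.2 then some x else some m)
          else pvBest L w' := by
        intro w'
        unfold pvBest
        rw [List.filter_append]
        by_cases hww : x.1.1 = w'
        · have hfx : [x].filter (fun y => y.1.1 == w') = [x] := by simp [hww]
          rw [hfx, pvMax?_append_one, if_pos hww]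
          cases PySem.List.max? (List.filter (fun y => y.1.1 == w') L) (fun y => y.2) <;> rfl
        · have hfx : [x].filter (fun y => y.1.1 == w') = [] := by simp [hww]
          rw [hfx, List.append_nil, if_neg hww]
      have hkeys2 : r.2.keys = PySem.Set.ofList (L.map (fun x => x.1.1)) := by
        show (r.2.items).map (fun p => p.1) = _
        rw [ihI, List.map_map]
        exact List.map_id _
      have hmem2 : ∀ w, r.2.contains w = true ↔ w ∈ L.map (fun x => x.1.1) := by
        intro w
        rw [PySem.Dict.contains_iff_mem_keys, hkeys2, PySem.Set.mem_ofList]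
      by_cases hc : r.1.getD x.1.1 0 < x.2
      · -- the new pair (strictly) beats the current best for its word: both dicts updated
        have hstep : pvWStep r x = (r.1.insert x.1.1 x.2, r.2.insert x.1.1 x.1.2) := by
          unfold pvWStep
          rw [if_pos hc]
        have hwin : pvBest (L ++ [x]) x.1.1 = some x := by
          rw [hbest x.1.1, if_pos rfl]
          cases hb : pvBest L x.1.1 with
          | none => rfl
          | some m =>
              have := ihV x.1.1
              rw [hb] at this
              simp only [Option.map_some, Option.getD_some] at this
              rw [this] at hc
              simp [hc]
        rw [hstep]
        constructor
        · by_cases hw : x.1.1 ∈ L.map (fun y => y.1.1)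
          · have hcont : r.2.contains x.1.1 = true := (hmem2 x.1.1).2 hw
            rw [PySem.Dict.items_insert_of_contains _ _ hcont, ihI, List.map_map,
              List.map_append, List.map_singleton, pvSet_ofList_append_one,
              pvSet_add_of_mem _ _ ((PySem.Set.mem_ofList _ _).2 hw)]
            refine List.map_congr_left (fun w' hw' => ?_)
            simp only [Function.comp]
            by_cases hwe : w' = x.1.1
            · subst hwe
              rw [hbest x.1.1, if_pos rfl]
              cases hb : pvBest L x.1.1 with
              | none => simp
              | some m =>
                  have := ihV x.1.1
                  rw [hb] at this
                  simp only [Option.map_some, Option.getD_some] at this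
                  rw [this] at hc
                  simp [hc]
            · have : ¬ (w' == x.1.1) = true := by simp [hwe]
              rw [if_neg this, hbest w', if_neg (fun hh => hwe hh.symm)]
          · have hcont : r.2.contains x.1.1 = false := by
              cases hct : r.2.contains x.1.1
              · rfl
              · exact absurd ((hmem2 x.1.1).1 hct) hw
            rw [PySem.Dict.items_insert_of_not_contains _ _ hcont, ihI,
              List.map_append, List.map_singleton, pvSet_ofList_append_one,
              pvSet_add_of_not_mem _ _ (fun hh => hw ((PySem.Set.mem_ofList _ _).1 hh)),
              List.map_append, List.map_singleton]
            congr 1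
            · refine List.map_congr_left (fun w' hw' => ?_)
              have hwL : w' ∈ L.map (fun y => y.1.1) := (PySem.Set.mem_ofList _ _).1 hw'
              have hwe : ¬ (x.1.1 = w') := fun hh => hw (hh ▸ hwL)
              rw [hbest w', if_neg hwe]
            · rw [hwin]
              rfl
        · intro w'
          rw [PySem.Dict.getD_insert]
          by_cases hwe : w' = x.1.1
          · subst hwe
            rw [if_pos rfl, hwin]
            rfl
          · rw [if_neg hwe, ihV w', hbest w', if_neg (fun hh => hwe hh.symm)]
      · -- the new pair does not beat the current best: nothing changes
        have hstep : pvWStep r x = r := by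
          unfold pvWStep
          rw [if_neg hc]
        have hw : x.1.1 ∈ L.map (fun y => y.1.1) := by
          by_contra hwn
          have := ihV x.1.1
          rw [pvBest_none L x.1.1 hwn] at this
          simp only [Option.map_none, Option.getD_none] at this
          rw [this] at hc
          omega
        obtain ⟨m, hm⟩ := pvBest_some L x.1.1 hw
        have hmv : ¬ (m.2 < x.2) := by
          have := ihV x.1.1
          rw [hm] at this
          simp only [Option.map_some, Option.getD_some] at this
          rw [this] at hc
          exact hc
        have hsame : ∀ w', pvBest (L ++ [x]) w' = pvBest L w' := by
          intro w'
          rw [hbest w']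
          by_cases hwe : x.1.1 = w'
          · subst hwe
            rw [if_pos rfl, hm]
            simp [hmv]
          · rw [if_neg hwe]
        rw [hstep]
        constructor
        · rw [ihI, List.map_append, List.map_singleton, pvSet_ofList_append_one,
            pvSet_add_of_mem _ _ ((PySem.Set.mem_ofList _ _).2 hw)]
          refine List.map_congr_left (fun w' _ => ?_)
          rw [hsame w']
        · intro w'
          rw [ihV w', hsame w']

-- ===== VERDICT (by name: the statement is the Claim_ definition above) =====
lemma pvFlatFold {σ : Type} (sentences : List (List (String × String)))
    (f : σ → (String × String) → σ) (init : σ) :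
    sentences.foldl (fun st sent => sent.foldl f st) init
      = (sentences.flatMap (fun sent => sent)).foldl f init := by
  rw [List.flatMap_id', List.foldl_flatten]

-- per-word agreement between A's winner over the pair Counter and B's argmax over the tag counter
lemma pvPerWord (pairs : List (String × String)) (w : String) :
    ((pvBest ((PySem.Set.ofList pairs).map (fun k => (k, (pairs.count k : Int)))) w).map
        (fun x => x.1.2)).getD ""
      = (PySem.List.max?
          (PySem.Dict.counter ((pairs.filter (fun p => p.1 == w)).map (fun p => p.2))).keys
          (fun t => (PySem.Dict.counter
            ((pairs.filter (fun p => p.1 == w)).map (fun p => p.2))).getD t 0)).getD "" := by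
  set lw := pairs.filter (fun p => p.1 == w) with hlwdef
  set tw := lw.map (fun p => p.2) with htwdef
  have hlw : ∀ x ∈ lw, x.1 = w := by
    intro x hx
    have := (List.mem_filter.1 hx).2
    simpa using this
  -- B's side down to a max? over the deduplicated filtered pairs
  have hB : PySem.List.max? (PySem.Dict.counter tw).keys
        (fun t => (PySem.Dict.counter tw).getD t 0)
      = (PySem.List.max? ((PySem.Set.ofList pairs).filter (fun p => p.1 == w))
          (fun q => (pairs.count q : Int))).map (fun x => x.2) := by
    rw [PySem.Dict.keys_counter,
      pvMax?_congr _ _ (fun t => (tw.count t : Int))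
        (fun t _ => PySem.Dict.getD_counter tw t),
      pvSet_ofList_map_snd w lw hlw, pvMax?_map, ← pvSet_ofList_filter]
    congr 1
    apply pvMax?_congr
    intro q hq
    have hq' := List.mem_filter.1 hq
    have hq1 : q.1 = w := by simpa using hq'.2
    have h1 : tw.count q.2 = lw.count (w, q.2) := pvCount_map_snd w lw hlw q.2
    have h2 : (w, q.2) = q := by
      cases q
      simp_all
    have h3 : lw.count q = pairs.count q :=
      List.count_filter (by simp [hq1])
    rw [h1, h2, h3]
  -- A's side down to the same max?
  have hA : pvBest ((PySem.Set.ofList pairs).map (fun k => (k, (pairs.count k : Int)))) w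
      = (PySem.List.max? ((PySem.Set.ofList pairs).filter (fun p => p.1 == w))
          (fun q => (pairs.count q : Int))).map (fun k => (k, (pairs.count k : Int))) := by
    unfold pvBest
    rw [List.filter_map, pvMax?_map]
    rfl
  rw [hA, hB, Option.map_map]
  rfl

lemma pvAsplit (l : List ((String × String) × Int)) :
    l.foldl
      (fun (st : (PySem.Dict String Int × PySem.Dict String String) × PySem.Dict String Int) pv =>
        (if st.1.1.getD pv.1.1 0 < pv.2 then
            (st.1.1.insert pv.1.1 pv.2, st.1.2.insert pv.1.1 pv.1.2)
          else st.1,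
         st.2.modify pv.1.2 0 (· + pv.2)))
      ((PySem.Dict.empty, PySem.Dict.empty), PySem.Dict.empty)
    = (l.foldl pvWStep (PySem.Dict.empty, PySem.Dict.empty),
       l.foldl (fun d pv => d.modify pv.1.2 0 (· + pv.2)) PySem.Dict.empty) :=
  PySem.List.foldl_prod_mk pvWStep
    (fun (d : PySem.Dict String Int) pv => d.modify pv.1.2 0 (· + pv.2)) l
    (PySem.Dict.empty, PySem.Dict.empty) PySem.Dict.empty

lemma pvBsplit (l : List (String × String)) :
    l.foldl
      (fun (st : PySem.Dict String Int × PySem.Dict String (PySem.Dict String Int)) p =>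
        (st.1.modify p.2 0 (· + 1),
         st.2.modify p.1 PySem.Dict.empty (fun c => c.modify p.2 0 (· + 1))))
      (PySem.Dict.empty, PySem.Dict.empty)
    = (l.foldl (fun d p => d.modify p.2 0 (· + 1)) PySem.Dict.empty,
       l.foldl (fun d p => d.modify p.1 PySem.Dict.empty (fun c => c.modify p.2 0 (· + 1)))
         PySem.Dict.empty) :=
  PySem.List.foldl_prod_mk
    (fun (d : PySem.Dict String Int) p => d.modify p.2 0 (· + 1))
    (fun (d : PySem.Dict String (PySem.Dict String Int)) p =>
      d.modify p.1 PySem.Dict.empty (fun c => c.modify p.2 0 (· + 1))) l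
    PySem.Dict.empty PySem.Dict.empty

theorem baseline_trainer_spec : Claim_equal_baseline_trainer := by
  intro sentences _hdom _hpre
  unfold Spec_baseline_trainer baseline_trainer baseline_trainer_alt
  dsimp only
  set pairs := sentences.flatMap (fun sent => sent) with hpairs
  rw [pvFlatFold, ← hpairs, pvBsplit, pvAsplit]
  dsimp only
  -- overall tag: both sides read the tag Counter
  have htotal : pairs.foldl (fun (d : PySem.Dict String Int) p => d.modify p.2 0 (· + 1))
        PySem.Dict.empty
      = PySem.Dict.counter (pairs.map (fun p => p.2)) := by
    rw [PySem.Dict.counter_eq_foldl, List.foldl_map]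
  have htop := pvTopTag pairs
  -- the word→tag dict of A, characterised by pvWLoop
  have hL1 : ∀ x ∈ (PySem.Dict.counter pairs).items, (1 : Int) ≤ x.2 := by
    rw [PySem.Dict.items_counter]
    intro x hx
    rcases List.mem_map.1 hx with ⟨k, hk, rfl⟩
    have hkp : k ∈ pairs := (PySem.Set.mem_ofList pairs k).1 hk
    have h0 : 0 < pairs.count k := List.count_pos_iff.2 hkp
    show (1 : Int) ≤ (pairs.count k : Int)
    exact_mod_cast h0
  obtain ⟨hAitems, -⟩ := pvWLoop (PySem.Dict.counter pairs).items hL1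
  rw [hAitems]
  -- the word list underlying A's result
  have hidx : PySem.Set.ofList ((PySem.Dict.counter pairs).items.map (fun x => x.1.1))
      = PySem.Set.ofList (pairs.map (fun p => p.1)) := by
    rw [PySem.Dict.items_counter, List.map_map, ← pvSet_ofList_map_ofList pairs (fun p => p.1)]
    rfl
  -- B's by_word dict, characterised
  set BW := pairs.foldl
    (fun (d : PySem.Dict String (PySem.Dict String Int)) p =>
      d.modify p.1 PySem.Dict.empty (fun c => c.modify p.2 0 (· + 1)))
    PySem.Dict.empty with hBWdef
  have hkeysBW : BW.keys = PySem.Set.ofList (pairs.map (fun p => p.1)) := by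
    have h : BW.keys = PySem.Set.update (PySem.Dict.empty.keys :
        PySem.Set String) (pairs.map (fun p => p.1)) :=
      PySem.Dict.keys_foldl_modify_key pairs (fun p => p.1) PySem.Dict.empty
        (fun _ p c => c.modify p.2 0 (· + 1)) PySem.Dict.empty
    rw [h, PySem.Dict.keys_empty, pvSet_update_nil]
  have hnodupBW : BW.keys.Nodup :=
    PySem.Dict.nodup_keys_foldl_modify_key pairs (fun p => p.1) PySem.Dict.empty
      (fun _ p c => c.modify p.2 0 (· + 1)) PySem.Dict.empty PySem.Dict.nodup_keys_empty
  have hgetBW : ∀ w, BW.getD w PySem.Dict.empty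
      = PySem.Dict.counter ((pairs.filter (fun p => p.1 == w)).map (fun p => p.2)) := by
    intro w
    have h := pvByWord_getD pairs PySem.Dict.empty w
    rw [PySem.Dict.getD_empty] at h
    rw [PySem.Dict.counter_eq_foldl]
    exact h
  -- B's word_tag dict comprehension: fresh distinct keys, so its items are the mapped list
  set lst := BW.items.map (fun wc =>
    (wc.1, (PySem.List.max? wc.2.keys (fun t => wc.2.getD t 0)).getD "")) with hlstdef
  have hlstfst : lst.map (fun a => a.1) = BW.keys := by
    rw [hlstdef, List.map_map]
    rfl
  have hfresh : (PySem.Dict.ofList lst).items = lst := by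
    have h := PySem.Dict.items_foldl_insert_fresh lst (fun a => a.1) (fun a => a.2)
      PySem.Dict.empty (fun a _ => PySem.Dict.contains_empty a.1)
      (by rw [hlstfst]; exact hnodupBW)
    have heta : lst.map (fun a => ((fun a => a.1) a, (fun a => a.2) a)) = lst := by
      simp
    rw [heta] at h
    exact h
  rw [hfresh, hlstdef,
    PySem.Dict.items_eq_map_keys BW hnodupBW PySem.Dict.empty, List.map_map, hkeysBW]
  -- both components agree
  refine Prod.ext ?_ ?_
  · show _ = List.map _ (PySem.Set.ofList (pairs.map (fun p => p.1)))
    rw [hidx]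
    refine List.map_congr_left (fun w _ => ?_)
    refine Prod.ext rfl ?_
    show ((pvBest ((PySem.Dict.counter pairs).items) w).map (fun x => x.1.2)).getD "" = _
    rw [PySem.Dict.items_counter]
    have h := pvPerWord pairs w
    rw [h]
    show _ = (PySem.List.max? ((fun c => c) (BW.getD w PySem.Dict.empty)).keys
      (fun t => (BW.getD w PySem.Dict.empty).getD t 0)).getD ""
    rw [hgetBW w]
  · show (PySem.List.max? ((PySem.Dict.counter pairs).items.foldl
        (fun d pv => d.modify pv.1.2 0 (· + pv.2)) PySem.Dict.empty).keys _).getD ""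
      = _
    rw [htop, htotal]
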